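-- pv_equiv track=rewrite | github.com/lhbbbb/TIL | Algorithm/Programmers/BFS-DFS/다단계칫솔판매.py | solution
-- ===== SOURCE A (Python) =====
-- def solution(enroll, referral, seller, amount):
--     answer = []
--
--     def calc_profit(k, money):
--         if not graph.get(k):
--             return
--         else:
--             tax = money // 10
--             if tax >= 1:
--                 graph[k][1] += money - tax
--                 calc_profit(graph[k][0], tax)
--             else:
--                 graph[k][1] += money
--                 return
--
--     # 1. init settings
--     graph = {}
--     for i in range(len(enroll)):
--         if not graph.get(enroll[i]):
--             graph[enroll[i]] = []
--         # [ref, profit]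
--         graph[enroll[i]].append(referral[i])
--         graph[enroll[i]].append(0)
--
--     # 2. calculate profit
--     for i in range(len(seller)):
--         calc_profit(seller[i], 100 * amount[i])
--
--
--     for ele in enroll:
--         answer.append(graph[ele][1])
--
--     return answer
-- ===== SOURCE B (Python) =====
-- def solution(enroll, referral, seller, amount):
--     # two flat dicts instead of a dict of [ref, profit] lists; explicit
--     # loop up the referral chain instead of recursion
--     parent = {}
--     profit = {}
--     for e, r in zip(enroll, referral):
--         if e not in parent:
--             parent[e] = r
--             profit[e] = 0
--     for s, a in zip(seller, amount):
--         k = s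
--         money = 100 * a
--         while k in parent:
--             tax = money // 10
--             if tax >= 1:
--                 profit[k] += money - tax
--                 k = parent[k]
--                 money = tax
--             else:
--                 profit[k] += money
--                 break
--     return [profit[e] for e in enroll]
-- ===== Notes on version B (the rewrite author's own statement) =====
-- stated objective: alternative
-- what changed: Replaces A's single dict of heterogeneous [referral, profit] list values (indexed by position) with two flat dicts (parent, profit) built from zip(enroll, referral), and replaces the recursive calc_profit with an explicit while-loop that walks up the referral chain carrying (node, money).
import Mathlib
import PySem

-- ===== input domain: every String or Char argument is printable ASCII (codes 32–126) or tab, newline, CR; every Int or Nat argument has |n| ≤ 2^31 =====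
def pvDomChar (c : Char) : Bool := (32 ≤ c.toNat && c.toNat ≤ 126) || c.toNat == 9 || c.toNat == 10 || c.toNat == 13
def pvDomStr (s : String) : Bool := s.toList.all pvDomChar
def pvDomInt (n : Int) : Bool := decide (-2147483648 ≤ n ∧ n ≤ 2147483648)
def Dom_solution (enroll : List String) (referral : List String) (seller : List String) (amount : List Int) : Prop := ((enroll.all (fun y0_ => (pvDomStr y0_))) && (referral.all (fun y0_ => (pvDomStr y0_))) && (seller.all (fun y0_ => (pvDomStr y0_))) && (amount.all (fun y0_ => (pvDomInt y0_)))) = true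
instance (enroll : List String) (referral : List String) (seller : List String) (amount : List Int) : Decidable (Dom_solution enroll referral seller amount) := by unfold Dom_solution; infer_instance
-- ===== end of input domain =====

-- B replaces A's dict of heterogeneous [ref, profit] lists by two flat dicts (parent, profit)
-- and walks up the referral chain with an explicit loop instead of recursion; same return value.

-- needed by the ports' termination proofs
theorem pv_tax_lt (money : Int) (h : 1 ≤ PySem.Int.floordiv money 10) :
    (PySem.Int.floordiv money 10).toNat < money.toNat := by
  have h10 : PySem.Int.floordiv money 10 = money / 10 :=
    PySem.Int.floordiv_eq_ediv_of_pos (by norm_num)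
  rw [h10] at h ⊢; omega

-- ===== PORT A =====
-- graph values in A are Python lists mixing a referral string and an int profit: List (String ⊕ Int)
abbrev PyV := Sum String Int

-- `not graph.get(k)`: falsy for a missing key or an empty list value
def pvNotGet (o : Option (List PyV)) : Bool :=
  match o with
  | none => true
  | some [] => true
  | some (_ :: _) => false

-- `graph[k][1] += m` (index 1 always holds the Sum.inr profit for the graphs A builds)
def pvBump (l : List PyV) (m : Int) : List PyV :=
  match l with
  | a :: Sum.inr p :: rest => a :: Sum.inr (p + m) :: rest
  | l => l

-- `graph[k][0]` (always Sum.inl for the graphs A builds)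
def pvRef (l : List PyV) : String :=
  match l with
  | Sum.inl r :: _ => r
  | _ => ""

-- `graph[ele][1]` read as an int (always Sum.inr for the graphs A builds)
def pvProfitOf (l : List PyV) : Int :=
  match l with
  | _ :: Sum.inr p :: _ => p
  | _ => 0

def calcProfitA (graph : PySem.Dict String (List PyV)) (k : String) (money : Int) :
    PySem.Dict String (List PyV) :=
  if pvNotGet (graph.get? k) then graph
  else
    let tax := PySem.Int.floordiv money 10
    if 1 ≤ tax then
      let l := (graph.get? k).getD []
      calcProfitA (graph.modify k [] (fun v => pvBump v (money - tax))) (pvRef l) tax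
    else
      graph.modify k [] (fun v => pvBump v money)
termination_by money.toNat
decreasing_by
  exact pv_tax_lt money (by assumption)

def solution (enroll : List String) (referral : List String) (seller : List String) (amount : List Int) : List Int :=
  let graph0 := (PySem.List.pyRange 0 (PySem.List.len enroll) 1).foldl
    (fun g i =>
      let g := if pvNotGet (g.get? (PySem.List.pyGetD enroll i "")) then
          g.insert (PySem.List.pyGetD enroll i "") [] else g
      let g := g.modify (PySem.List.pyGetD enroll i "") []
          (fun l => l ++ [Sum.inl (PySem.List.pyGetD referral i "")])
      g.modify (PySem.List.pyGetD enroll i "") [] (fun l => l ++ [Sum.inr 0]))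
    PySem.Dict.empty
  let graph := (PySem.List.pyRange 0 (PySem.List.len seller) 1).foldl
    (fun g i => calcProfitA g (PySem.List.pyGetD seller i "") (100 * PySem.List.pyGetD amount i 0))
    graph0
  enroll.foldl (fun ans e => ans ++ [pvProfitOf (graph.getD e [])]) []

-- ===== PORT B =====
def walkB (parent : PySem.Dict String String) (profit : PySem.Dict String Int)
    (k : String) (money : Int) : PySem.Dict String Int :=
  match parent.get? k with
  | none => profit
  | some r =>
    let tax := PySem.Int.floordiv money 10
    if 1 ≤ tax then
      walkB parent (profit.modify k 0 (fun p => p + (money - tax))) r tax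
    else
      profit.modify k 0 (fun p => p + money)
termination_by money.toNat
decreasing_by
  exact pv_tax_lt money (by assumption)

def solution_alt (enroll : List String) (referral : List String) (seller : List String) (amount : List Int) : List Int :=
  let pq := (enroll.zip referral).foldl
    (fun (pq : PySem.Dict String String × PySem.Dict String Int) er =>
      if pq.1.contains er.1 then pq
      else (pq.1.insert er.1 er.2, pq.2.insert er.1 0))
    (PySem.Dict.empty, PySem.Dict.empty)
  let profit := (seller.zip amount).foldl
    (fun pr sa => walkB pq.1 pr sa.1 (100 * sa.2)) pq.2
  enroll.map (fun e => profit.getD e 0)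

-- ===== PRECONDITION & SPEC =====
-- Pre_ excludes only the inputs where A raises IndexError: referral shorter than enroll,
-- or amount shorter than seller.
def Pre_solution (enroll : List String) (referral : List String) (seller : List String) (amount : List Int) : Prop :=
  enroll.length ≤ referral.length ∧ seller.length ≤ amount.length
instance (enroll : List String) (referral : List String) (seller : List String) (amount : List Int) : Decidable (Pre_solution enroll referral seller amount) := by unfold Pre_solution; infer_instance

def pvWitness_solution : List String × List String × List String × List Int :=
  (["b", "c"], ["-", "b"], ["b"], [10])

def Spec_solution (enroll : List String) (referral : List String) (seller : List String) (amount : List Int) (out : List Int) : Prop := out = solution_alt enroll referral seller amount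
instance (enroll : List String) (referral : List String) (seller : List String) (amount : List Int) (out : List Int) : Decidable (Spec_solution enroll referral seller amount out) := by unfold Spec_solution; infer_instance

-- ===== CLAIM (what is proved, stated in full; the proofs are below) =====
def Claim_equal_solution : Prop := ∀ (enroll : List String) (referral : List String) (seller : List String) (amount : List Int), Dom_solution enroll referral seller amount → Pre_solution enroll referral seller amount → Spec_solution enroll referral seller amount (solution enroll referral seller amount)


-- ===== LEMMAS AND PROOFS =====

-- fold over range(len xs) reading xs[i], ys[i] = fold over zip(xs, ys), when ys covers xs
theorem foldl_pyRange_zip {α β γ : Type} (f : α → β → γ → α) (dβ : β) (dγ : γ)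
    (xs : List β) (ys : List γ) (h : xs.length ≤ ys.length) (init : α) :
    (PySem.List.pyRange 0 (PySem.List.len xs) 1).foldl
      (fun a i => f a (PySem.List.pyGetD xs i dβ) (PySem.List.pyGetD ys i dγ)) init
    = (xs.zip ys).foldl (fun a p => f a p.1 p.2) init := by
  have hz : (xs.zip ys).length = xs.length := by
    rw [List.length_zip]; omega
  have hlen : PySem.List.len xs = PySem.List.len (xs.zip ys) := by
    simp [PySem.List.len_eq, hz]
  rw [hlen, ← PySem.List.foldl_pyRange_zero_pyGetD (xs.zip ys) (dβ, dγ)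
        (fun a p => f a p.1 p.2) init]
  apply PySem.List.foldl_congr_mem
  intro acc i hi
  rw [PySem.List.mem_pyRange_one] at hi
  obtain ⟨h0, h1⟩ := hi
  rw [PySem.List.len_eq] at h1
  rw [PySem.List.pyGetD_eq_getElem _ _ h0 (by omega),
      PySem.List.pyGetD_eq_getElem _ _ h0 (by omega),
      PySem.List.pyGetD_eq_getElem _ _ h0 (by omega)]
  simp [List.getElem_zip]

-- the simulation relation between A's graph and B's (parent, profit) dicts
def pvRel (g : PySem.Dict String (List PyV)) (par : PySem.Dict String String)
    (pr : PySem.Dict String Int) : Prop :=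
  ∀ k : String,
    (g.get? k = none ∧ par.get? k = none ∧ pr.get? k = none) ∨
    (∃ r p rest, g.get? k = some (Sum.inl r :: Sum.inr p :: rest) ∧
      par.get? k = some r ∧ pr.get? k = some p)

theorem get?_modify {κ ν : Type} [BEq κ] [LawfulBEq κ] [DecidableEq κ]
    (d : PySem.Dict κ ν) (k k' : κ) (d0 : ν) (f : ν → ν) :
    (d.modify k d0 f).get? k' = if k' = k then some (f (d.getD k d0)) else d.get? k' := by
  simp [PySem.Dict.modify, PySem.Dict.get?_insert]

def pvStepA (g : PySem.Dict String (List PyV)) (er : String × String) :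
    PySem.Dict String (List PyV) :=
  let g := if pvNotGet (g.get? er.1) then g.insert er.1 [] else g
  let g := g.modify er.1 [] (fun l => l ++ [Sum.inl er.2])
  g.modify er.1 [] (fun l => l ++ [Sum.inr 0])

def pvStepB (pq : PySem.Dict String String × PySem.Dict String Int) (er : String × String) :
    PySem.Dict String String × PySem.Dict String Int :=
  if pq.1.contains er.1 then pq else (pq.1.insert er.1 er.2, pq.2.insert er.1 0)

theorem rel_pvStepA (g par pr) (er : String × String) (h : pvRel g par pr) :
    pvRel (pvStepA g er) (pvStepB (par, pr) er).1 (pvStepB (par, pr) er).2 := by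
  intro k
  rcases h er.1 with ⟨h1, h2, h3⟩ | ⟨r0, p0, rest, h1, h2, h3⟩
  · have hc : par.contains er.1 = false := by
      rw [PySem.Dict.contains_eq_isSome_get?, h2]; rfl
    by_cases hk : k = er.1
    · subst hk; right
      refine ⟨er.2, 0, [], ?_, ?_, ?_⟩ <;>
        simp [pvStepA, pvStepB, hc, get?_modify,
          PySem.Dict.getD_eq_get?_getD, h1, pvNotGet]
    · rcases h k with ⟨g1, g2, g3⟩ | ⟨r, p, rest', g1, g2, g3⟩
      · left
        simp [pvStepA, pvStepB, hc, get?_modify, PySem.Dict.get?_insert, hk,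
          g1, g2, g3, h1, pvNotGet]
      · right
        exact ⟨r, p, rest',
          by simp [pvStepA, get?_modify, PySem.Dict.get?_insert, hk, g1, h1, pvNotGet],
          by simp [pvStepB, hc, PySem.Dict.get?_insert, hk, g2],
          by simp [pvStepB, hc, PySem.Dict.get?_insert, hk, g3]⟩
  · have hc : par.contains er.1 = true := by
      rw [PySem.Dict.contains_eq_isSome_get?, h2]; rfl
    by_cases hk : k = er.1
    · subst hk; right
      refine ⟨r0, p0, (rest ++ [Sum.inl er.2]) ++ [Sum.inr 0], ?_, ?_, ?_⟩ <;>
        simp [pvStepA, pvStepB, hc, get?_modify, PySem.Dict.getD_eq_get?_getD,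
          h1, h2, h3, pvNotGet]
    · rcases h k with ⟨g1, g2, g3⟩ | ⟨r, p, rest', g1, g2, g3⟩
      · left
        simp [pvStepA, pvStepB, hc, get?_modify, hk, g1, g2, g3, h1, pvNotGet]
      · right
        exact ⟨r, p, rest',
          by simp [pvStepA, get?_modify, hk, g1, h1, pvNotGet],
          by simp [pvStepB, hc, g2],
          by simp [pvStepB, hc, g3]⟩

theorem pv_rel_build (pairs : List (String × String)) (g par pr) (h : pvRel g par pr) :
    pvRel (pairs.foldl pvStepA g) (pairs.foldl pvStepB (par, pr)).1 (pairs.foldl pvStepB (par, pr)).2 := by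
  induction pairs generalizing g par pr with
  | nil => exact h
  | cons er rest ih =>
    simp only [List.foldl_cons]
    have := rel_pvStepA g par pr er h
    cases hb : pvStepB (par, pr) er with
    | mk par' pr' => rw [hb] at this; exact ih _ _ _ this

theorem rel_calc (par : PySem.Dict String String) (k : String) (money : Int) :
    ∀ (g : PySem.Dict String (List PyV)) (pr : PySem.Dict String Int), pvRel g par pr →
    pvRel (calcProfitA g k money) par (walkB par pr k money) := by
  intro g pr h
  rw [calcProfitA.eq_def, walkB.eq_def]
  rcases h k with ⟨h1, h2, h3⟩ | ⟨r0, p0, rest, h1, h2, h3⟩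
  · simp only [h1, h2, pvNotGet]
    exact h
  · simp only [h1, h2, pvNotGet, Bool.false_eq_true, if_false]
    by_cases htax : 1 ≤ PySem.Int.floordiv money 10
    · simp only [htax, if_true]
      have h' : pvRel (g.modify k [] (fun v => pvBump v (money - PySem.Int.floordiv money 10)))
          par (pr.modify k 0 (fun p => p + (money - PySem.Int.floordiv money 10))) := by
        intro k'
        by_cases hk : k' = k
        · subst hk; right
          exact ⟨r0, p0 + (money - PySem.Int.floordiv money 10), rest,
            by simp [get?_modify, PySem.Dict.getD_eq_get?_getD, h1, pvBump],
            h2,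
            by simp [get?_modify, PySem.Dict.getD_eq_get?_getD, h3]⟩
        · rcases h k' with ⟨g1, g2, g3⟩ | ⟨r, p, rest', g1, g2, g3⟩
          · left; simp [get?_modify, hk, g1, g2, g3]
          · right; exact ⟨r, p, rest', by simp [get?_modify, hk, g1], g2,
              by simp [get?_modify, hk, g3]⟩
      have hrec := rel_calc par (pvRef ((g.get? k).getD [])) (PySem.Int.floordiv money 10) _ _ h'
      simpa [h1, pvRef] using hrec
    · simp only [htax, if_false]
      intro k'
      by_cases hk : k' = k
      · subst hk; right
        exact ⟨r0, p0 + money, rest,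
          by simp [get?_modify, PySem.Dict.getD_eq_get?_getD, h1, pvBump],
          h2,
          by simp [get?_modify, PySem.Dict.getD_eq_get?_getD, h3]⟩
      · rcases h k' with ⟨g1, g2, g3⟩ | ⟨r, p, rest', g1, g2, g3⟩
        · left; simp [get?_modify, hk, g1, g2, g3]
        · right; exact ⟨r, p, rest', by simp [get?_modify, hk, g1], g2,
            by simp [get?_modify, hk, g3]⟩
termination_by money.toNat
decreasing_by exact pv_tax_lt money htax

theorem rel_sell (sales : List (String × Int)) (par) :
    ∀ (g : PySem.Dict String (List PyV)) (pr : PySem.Dict String Int), pvRel g par pr →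
    pvRel (sales.foldl (fun g sa => calcProfitA g sa.1 (100 * sa.2)) g) par
        (sales.foldl (fun pr sa => walkB par pr sa.1 (100 * sa.2)) pr) := by
  induction sales with
  | nil => exact fun g pr h => h
  | cons sa rest ih =>
    intro g pr h
    simp only [List.foldl_cons]
    exact ih _ _ (rel_calc par sa.1 (100 * sa.2) g pr h)

theorem rel_answer (g par pr) (h : pvRel g par pr) (e : String) :
    pvProfitOf (g.getD e []) = pr.getD e 0 := by
  rcases h e with ⟨h1, _, h3⟩ | ⟨r, p, rest, h1, _, h3⟩ <;>
    simp [PySem.Dict.getD_eq_get?_getD, h1, h3, pvProfitOf]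

-- ===== VERDICT (by name: the statement is the Claim_ definition above) =====
theorem buildA_eq (enroll referral : List String) (h : enroll.length ≤ referral.length) :
    (PySem.List.pyRange 0 (PySem.List.len enroll) 1).foldl
      (fun g i =>
        let g := if pvNotGet (g.get? (PySem.List.pyGetD enroll i "")) then
            g.insert (PySem.List.pyGetD enroll i "") [] else g
        let g := g.modify (PySem.List.pyGetD enroll i "") []
            (fun l => l ++ [Sum.inl (PySem.List.pyGetD referral i "")])
        g.modify (PySem.List.pyGetD enroll i "") [] (fun l => l ++ [Sum.inr 0]))
      PySem.Dict.empty
    = (enroll.zip referral).foldl pvStepA PySem.Dict.empty :=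
  foldl_pyRange_zip (fun g e r => pvStepA g (e, r)) "" "" enroll referral h PySem.Dict.empty

theorem sellA_eq (seller : List String) (amount : List Int) (h : seller.length ≤ amount.length)
    (g : PySem.Dict String (List PyV)) :
    (PySem.List.pyRange 0 (PySem.List.len seller) 1).foldl
      (fun g i => calcProfitA g (PySem.List.pyGetD seller i "") (100 * PySem.List.pyGetD amount i 0)) g
    = (seller.zip amount).foldl (fun g sa => calcProfitA g sa.1 (100 * sa.2)) g :=
  foldl_pyRange_zip (fun g s a => calcProfitA g s (100 * a)) "" 0 seller amount h g

theorem solution_spec : Claim_equal_solution := by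
  intro enroll referral seller amount _ hpre
  unfold Spec_solution solution solution_alt
  simp only []
  rw [buildA_eq enroll referral hpre.1, sellA_eq seller amount hpre.2,
      PySem.List.foldl_append_singleton_eq_map, List.nil_append]
  have hrel0 : pvRel PySem.Dict.empty PySem.Dict.empty PySem.Dict.empty := by
    intro k; left; simp [PySem.Dict.get?_empty]
  have hrel1 := pv_rel_build (enroll.zip referral) _ _ _ hrel0
  have hrel2 := rel_sell (seller.zip amount) _ _ _ hrel1
  exact List.map_congr_left (fun e _ => rel_answer _ _ _ hrel2 e)
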